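-- pv_equiv track=rewrite | github.com/Khepanha/Python_Bootcamp | week02/ex/e28_list_sort_set.py | list_sort_set
-- ===== SOURCE A (Python) =====
-- def list_sort_set (L):
--     A = []
--     L.sort()
--     rev = L[::-1]
--     for i in (rev):
--         if i not in A:
--             A.append(i)
--     return A
-- ===== SOURCE B (Python) =====
-- def list_sort_set(L):
--     L.sort()
--     out = []
--     for x in reversed(L):
--         if not out or out[-1] != x:
--             out.append(x)
--     return out
-- ===== Notes on version B (the rewrite author's own statement) =====
-- stated objective: faster
-- what changed: Replaces the membership test against the whole accumulated list with an adjacent-duplicate check against only the last appended element, exploiting the sorted order; the O(k) inner scan disappears.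
import Mathlib
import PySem

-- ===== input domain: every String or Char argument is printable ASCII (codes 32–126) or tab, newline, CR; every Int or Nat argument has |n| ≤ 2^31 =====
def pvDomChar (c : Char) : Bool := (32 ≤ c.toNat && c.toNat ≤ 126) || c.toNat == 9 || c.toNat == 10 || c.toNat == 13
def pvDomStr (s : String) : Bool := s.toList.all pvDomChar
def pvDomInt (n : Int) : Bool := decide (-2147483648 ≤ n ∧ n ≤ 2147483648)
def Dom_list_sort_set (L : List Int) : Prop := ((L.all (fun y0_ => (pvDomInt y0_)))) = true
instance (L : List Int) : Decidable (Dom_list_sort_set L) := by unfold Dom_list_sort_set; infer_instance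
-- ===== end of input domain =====

-- B collapses adjacent duplicates of the descending sorted list (checking only the last
-- appended element) instead of scanning the whole accumulator for membership.
-- NOTE: both A and B sort L in place in Python; the equivalence proved here is about the return value.

-- ===== PORT A =====
def list_sort_set (L : List Int) : List Int :=
  let Ls := PySem.List.sorted L id false          -- L.sort()
  let rev := (PySem.List.slice? Ls none none (-1)).getD []   -- L[::-1]
  rev.foldl (fun A i => if i ∈ A then A else A ++ [i]) []

-- ===== PORT B =====
def list_sort_set_alt (L : List Int) : List Int :=
  let Ls := PySem.List.sorted L id false          -- L.sort()
  Ls.reverse.foldl (fun out x =>                  -- for x in reversed(L)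
    if out.isEmpty then out ++ [x]                -- not out
    else if PySem.List.pyGet? out (-1) ≠ some x then out ++ [x]  -- out[-1] != x
    else out) []

-- ===== PRECONDITION & SPEC =====
def Spec_list_sort_set (L : List Int) (out : List Int) : Prop := out = list_sort_set_alt L
instance (L : List Int) (out : List Int) : Decidable (Spec_list_sort_set L out) := by unfold Spec_list_sort_set; infer_instance

-- ===== CLAIM (what is proved, stated in full; the proofs are below) =====
def Claim_equal_list_sort_set : Prop := ∀ (L : List Int), Dom_list_sort_set L → Spec_list_sort_set L (list_sort_set L)

-- ===== LEMMAS AND PROOFS =====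

-- in a strictly decreasing list, the last element is the minimum
theorem pv_last_min (acc : List Int) (hp : acc.Pairwise (fun a b => b < a))
    (l : Int) (hl : acc.getLast? = some l) : ∀ a ∈ acc, l ≤ a := by
  rcases List.getLast?_eq_some_iff.mp hl with ⟨ys, rfl⟩
  have h := List.pairwise_append.mp hp
  intro a ha
  rcases List.mem_append.mp ha with ha' | ha'
  · have := h.2.2 a ha' l (by simp); omega
  · simp at ha'; omega

-- core invariant: on a descending list, membership dedup = adjacent dedup
theorem pv_fold_eq (r : List Int) : ∀ (acc : List Int),
    r.Pairwise (fun a b => b ≤ a) →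
    (∀ x ∈ r, ∀ l, acc.getLast? = some l → x ≤ l) →
    acc.Pairwise (fun a b => b < a) →
    r.foldl (fun A i => if i ∈ A then A else A ++ [i]) acc =
    r.foldl (fun out x =>
      if out.isEmpty then out ++ [x]
      else if PySem.List.pyGet? out (-1) ≠ some x then out ++ [x]
      else out) acc := by
  induction r with
  | nil => intro acc _ _ _; rfl
  | cons x rest ih =>
    intro acc hr hle hp
    have hr' := (List.pairwise_cons.mp hr)
    rcases hacc : acc.getLast? with _ | l
    · -- acc is empty
      have hnil : acc = [] := by
        cases acc with
        | nil => rfl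
        | cons a as => simp at hacc
      subst hnil
      simp only [List.foldl_cons, List.not_mem_nil, List.isEmpty_nil, if_pos,
        List.nil_append]
      apply ih [x] hr'.2
      · intro y hy l hl
        simp at hl; subst hl
        exact hr'.1 y hy
      · simp
    · -- acc nonempty with last element l
      have hne : ¬ (acc.isEmpty = true) := by
        simp only [List.isEmpty_iff]
        intro h; subst h; simp at hacc
      have hxl : x ≤ l := hle x (by simp) l hacc
      have hget : PySem.List.pyGet? acc (-1) = some l := by
        rw [PySem.List.pyGet?_neg_one, hacc]
      simp only [List.foldl_cons]
      rcases eq_or_lt_of_le hxl with rfl | hlt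
      · -- x = l : both keep acc
        have hmem : x ∈ acc := by
          rcases List.getLast?_eq_some_iff.mp hacc with ⟨ys, rfl⟩; simp
        rw [if_pos hmem, if_neg hne, hget, if_neg (by simp)]
        apply ih acc hr'.2
        · intro y hy l' hl'
          rw [hacc] at hl'; injection hl' with h; subst h
          exact le_trans (hr'.1 y hy) hxl
        · exact hp
      · -- x < l : both append
        have hnmem : x ∉ acc := by
          intro hmem
          have := pv_last_min acc hp l hacc x hmem
          omega
        rw [if_neg hnmem, if_neg hne, hget, if_pos (by simp; omega)]
        apply ih (acc ++ [x]) hr'.2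
        · intro y hy l' hl'
          simp at hl'; subst hl'
          exact hr'.1 y hy
        · rw [List.pairwise_append]
          refine ⟨hp, by simp, ?_⟩
          intro a ha b hb
          simp at hb; subst hb
          have := pv_last_min acc hp l hacc a ha
          omega

-- L[::-1] is reverse
theorem pv_rev (xs : List Int) :
    (PySem.List.slice? xs none none (-1)).getD [] = xs.reverse := by
  rw [PySem.List.slice?_none_none_neg_one]; rfl

-- ===== VERDICT (by name: the statement is the Claim_ definition above) =====
theorem list_sort_set_spec : Claim_equal_list_sort_set := by
  intro L _
  unfold Spec_list_sort_set list_sort_set list_sort_set_alt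
  simp only [pv_rev]
  apply pv_fold_eq
  · rw [List.pairwise_reverse]
    exact (PySem.List.sorted_pairwise L id).imp (fun h => h)
  · intro x _ l hl; simp at hl
  · exact List.Pairwise.nil
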